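-- pv_equiv track=rewrite | github.com/aniketmondal1210/GFG-Chronicles | Difficulty: Basic/Wrong Ball/wrong_ball.py | countWrongPlacedBalls
-- ===== SOURCE A (Python) =====
-- def countWrongPlacedBalls(s):
--     # code here
--     count = 0
--     for i in range(len(s)):
--         if i % 2 == 1 and s[i] == 'R':
--             count += 1
--         if i % 2 == 0 and s[i] == 'B':
--             count += 1
--     return count
-- ===== SOURCE B (Python) =====
-- def countWrongPlacedBalls(s):
--     return s[::2].count('B') + s[1::2].count('R')
-- ===== Notes on version B (the rewrite author's own statement) =====
-- stated objective: idiomatic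
-- what changed: Replaces the index loop with parity branches by two strided slices (even and odd positions) counted directly with str.count.
import Mathlib
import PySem

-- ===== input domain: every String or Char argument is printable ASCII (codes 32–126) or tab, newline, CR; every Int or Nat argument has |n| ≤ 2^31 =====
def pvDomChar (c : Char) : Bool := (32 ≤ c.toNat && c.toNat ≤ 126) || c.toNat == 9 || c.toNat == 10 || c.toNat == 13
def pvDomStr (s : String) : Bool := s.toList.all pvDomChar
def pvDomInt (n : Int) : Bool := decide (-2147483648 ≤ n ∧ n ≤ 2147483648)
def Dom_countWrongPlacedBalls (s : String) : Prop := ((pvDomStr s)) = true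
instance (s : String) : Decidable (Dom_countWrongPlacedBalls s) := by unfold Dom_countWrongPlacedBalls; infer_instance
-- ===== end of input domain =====

-- B replaces A's single index loop with parity branches by two strided slices counted with str.count (idiomatic; same cost).

-- ===== PORT A =====
def countWrongPlacedBalls (s : String) : Int :=
  (PySem.List.pyRange 0 (PySem.Str.len s) 1).foldl
    (fun count i =>
      let count := if PySem.Int.mod i 2 = 1 ∧ PySem.Str.pyGet? s i = some 'R' then count + 1 else count
      if PySem.Int.mod i 2 = 0 ∧ PySem.Str.pyGet? s i = some 'B' then count + 1 else count)
    0

-- ===== PORT B =====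
def countWrongPlacedBalls_alt (s : String) : Int :=
  ((PySem.Str.count ((PySem.Str.slice? s none none 2).getD "") "B" : Int)
    + (PySem.Str.count ((PySem.Str.slice? s (some 1) none 2).getD "") "R" : Int))

-- ===== PRECONDITION & SPEC =====
def Spec_countWrongPlacedBalls (s : String) (out : Int) : Prop := out = countWrongPlacedBalls_alt s
instance (s : String) (out : Int) : Decidable (Spec_countWrongPlacedBalls s out) := by unfold Spec_countWrongPlacedBalls; infer_instance

-- ===== CLAIM (what is proved, stated in full; the proofs are below) =====
def Claim_equal_countWrongPlacedBalls : Prop := ∀ (s : String), Dom_countWrongPlacedBalls s → Spec_countWrongPlacedBalls s (countWrongPlacedBalls s)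

-- ===== LEMMAS AND PROOFS =====

/-- Elements at even positions (0, 2, 4, …). -/
def pvEvens {α : Type} : List α → List α
  | [] => []
  | [c] => [c]
  | c :: _ :: t => c :: pvEvens t

/-- Elements at odd positions (1, 3, 5, …). -/
def pvOdds {α : Type} (l : List α) : List α := pvEvens l.tail

/-- The loop body of A, on an (index, char) pair. -/
def pvStep (count : Int) (p : Int × Char) : Int :=
  let count := if PySem.Int.mod p.1 2 = 1 ∧ p.2 = 'R' then count + 1 else count
  if PySem.Int.mod p.1 2 = 0 ∧ p.2 = 'B' then count + 1 else count

theorem pvEvens_cons {α : Type} (c : α) (t : List α) : pvEvens (c :: t) = c :: pvOdds t := by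
  cases t <;> rfl

theorem pvStep_fold (cs : List Char) : ∀ (k acc : Int),
    (PySem.List.enumerate cs k).foldl pvStep acc =
      acc + (if PySem.Int.mod k 2 = 0
             then ((pvEvens cs).count 'B' + (pvOdds cs).count 'R' : Int)
             else ((pvEvens cs).count 'R' + (pvOdds cs).count 'B' : Int)) := by
  induction cs with
  | nil => intro k acc; simp [PySem.List.enumerate_nil, pvEvens, pvOdds]
  | cons c t ih =>
    intro k acc
    rw [PySem.List.enumerate_cons, List.foldl_cons, ih]
    have h2 : (0:Int) < 2 := by norm_num
    have hk := PySem.Int.mod_eq_emod_of_pos (a:=k) h2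
    have hk1 := PySem.Int.mod_eq_emod_of_pos (a:=k+1) h2
    have hcases : PySem.Int.mod k 2 = 0 ∨ PySem.Int.mod k 2 = 1 := by
      rw [hk]; omega
    rcases hcases with h | h
    · have h1 : PySem.Int.mod (k+1) 2 = 1 := by rw [hk1]; rw [hk] at h; omega
      simp only [pvStep, h, h1, pvEvens_cons, pvOdds, List.tail_cons, List.count_cons]
      by_cases hc : c = 'B'
      · simp [hc]; ring
      · simp [hc]; ring
    · have h1 : PySem.Int.mod (k+1) 2 = 0 := by rw [hk1]; rw [hk] at h; omega
      simp only [pvStep, h, h1, pvEvens_cons, pvOdds, List.tail_cons, List.count_cons]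
      by_cases hc : c = 'R'
      · simp [hc]; ring
      · simp [hc]; ring

theorem pvFilterMap_evens {α : Type} (t : List α) :
    List.filterMap (fun k => t[2*k]?) (List.range ((t.length+1)/2)) = pvEvens t := by
  induction t using pvEvens.induct with
  | case1 => simp [pvEvens]
  | case2 c => simp [pvEvens]
  | case3 c d t ih =>
    have hlen : ((c :: d :: t).length + 1)/2 = (t.length+1)/2 + 1 := by
      simp [List.length_cons]; omega
    rw [hlen, List.range_succ_eq_map, List.filterMap_cons, List.filterMap_map]
    simp only [Function.comp]
    have hf : (fun k => (c :: d :: t)[2 * Nat.succ k]?) = (fun k => t[2*k]?) := by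
      funext k
      have : 2 * Nat.succ k = 2*k + 2 := by omega
      rw [this]
      simp
    simp only [Nat.succ_eq_add_one] at hf ⊢
    rw [show (fun k => (c :: d :: t)[2 * (k+1)]?) = (fun k => t[2*k]?) from hf]
    simp [ih, pvEvens]

theorem pvSliceIdx_even (n : Nat) :
    PySem.List.sliceIndices n none none 2 = ((0:Int), (n:Int), (2:Int)) := rfl

theorem pvSliceIdx_odd (n : Nat) :
    PySem.List.sliceIndices n (some 1) none 2 = (min 1 (n:Int), (n:Int), (2:Int)) := rfl

theorem pvSlice_even (cs : List Char) :
    PySem.List.slice? cs none none 2 = some (pvEvens cs) := by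
  simp only [PySem.List.slice?, pvSliceIdx_even]
  rw [if_neg (by decide : ¬((2:Int) = 0))]
  have hcount : (if (0:Int) < 2 then
        if (0:Int) < (cs.length:Int) then (((cs.length:Int) - 0 + 2 - 1) / 2).toNat else 0
      else if (cs.length:Int) < 0 then ((0 - (cs.length:Int) + -2 - 1) / -2).toNat else 0)
      = (cs.length + 1) / 2 := by
    rw [if_pos (by decide : (0:Int) < 2)]
    by_cases h : 0 < cs.length
    · rw [if_pos (by exact_mod_cast h)]; omega
    · rw [if_neg (by exact_mod_cast h)]; omega
  rw [hcount]
  rw [show (fun x : Nat => cs[((0:Int) + 2 * (x:Int)).toNat]?) = (fun x : Nat => cs[2*x]?) from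
    funext fun x => by rw [show ((0:Int) + 2 * (x:Int)).toNat = 2*x by omega]]
  exact congrArg some (pvFilterMap_evens cs)

theorem pvSlice_odd (cs : List Char) :
    PySem.List.slice? cs (some 1) none 2 = some (pvOdds cs) := by
  cases cs with
  | nil => rfl
  | cons c t =>
    simp only [PySem.List.slice?, pvSliceIdx_odd]
    rw [if_neg (by decide : ¬((2:Int) = 0))]
    have hmin : min 1 (((c :: t).length : Nat) : Int) = 1 := by
      simp [List.length_cons]
    rw [hmin]
    have hcount : (if (0:Int) < 2 then
          if (1:Int) < ((c :: t).length:Int) then ((((c :: t).length:Int) - 1 + 2 - 1) / 2).toNat else 0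
        else if ((c :: t).length:Int) < 1 then ((1 - ((c :: t).length:Int) + -2 - 1) / -2).toNat else 0)
        = (t.length + 1) / 2 := by
      rw [if_pos (by decide : (0:Int) < 2)]
      have hl : ((c :: t).length : Int) = (t.length : Int) + 1 := by simp
      by_cases h : (1:Int) < ((c :: t).length:Int)
      · rw [if_pos h]; rw [hl] at h ⊢; omega
      · rw [if_neg h]; rw [hl] at h; omega
    rw [hcount]
    rw [show (fun x : Nat => (c :: t)[((1:Int) + 2 * (x:Int)).toNat]?) = (fun x : Nat => t[2*x]?) from
      funext fun x => by
        rw [show ((1:Int) + 2 * (x:Int)).toNat = 2*x + 1 by omega]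
        exact List.getElem?_cons_succ]
    exact congrArg some (pvFilterMap_evens t)

theorem pvCount_go (c : Char) : ∀ (fuel : Nat) (l : List Char) (acc : Nat),
    l.length ≤ fuel → PySem.Chars.count.go [c] fuel l acc = acc + l.count c := by
  intro fuel
  induction fuel with
  | zero =>
    intro l acc h
    have : l = [] := by cases l <;> simp_all
    subst this
    simp [PySem.Chars.count.go]
  | succ n ih =>
    intro l acc h
    cases l with
    | nil => simp [PySem.Chars.count.go]
    | cons hd tl =>
      by_cases hc : c = hd
      · have hpre : [c].isPrefixOf (hd :: tl) = true := by
          simp [List.isPrefixOf, hc]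
        simp only [PySem.Chars.count.go, hpre, if_true, List.length_cons, List.length_nil,
          List.drop_succ_cons, List.drop_zero]
        rw [ih tl (acc + 1) (by simpa using Nat.le_of_succ_le_succ h)]
        rw [List.count_cons]
        simp [hc]
        omega
      · have hpre : [c].isPrefixOf (hd :: tl) = false := by
          simp [List.isPrefixOf]; exact hc
        simp only [PySem.Chars.count.go, hpre, Bool.false_eq_true, if_false]
        rw [ih tl acc (by simpa using Nat.le_of_succ_le_succ h)]
        rw [List.count_cons]
        have : (hd == c) = false := by simp; exact fun e => hc e.symm
        simp [this]

theorem pvCount_singleton (c : Char) (l : List Char) :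
    PySem.Chars.count l [c] = l.count c := by
  unfold PySem.Chars.count
  rw [if_neg (by simp : ¬([c].isEmpty = true))]
  simpa using pvCount_go c l.length l 0 le_rfl

theorem pvA_eq_enumerate (s : String) :
    countWrongPlacedBalls s = (PySem.List.enumerate s.toList 0).foldl pvStep 0 := by
  rw [PySem.List.enumerate_eq_map_pyRange s.toList 'a', List.foldl_map]
  unfold countWrongPlacedBalls
  rw [show PySem.Str.len s = PySem.List.len s.toList from rfl]
  apply PySem.List.foldl_congr_mem
  intro acc j hj
  rw [PySem.List.mem_pyRange_one] at hj
  obtain ⟨h0, h1⟩ := hj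
  have hjn : j = ((j.toNat : Nat) : Int) := (Int.toNat_of_nonneg h0).symm
  have hlt : j.toNat < s.toList.length := by
    have : PySem.List.len s.toList = (s.toList.length : Int) := rfl
    rw [this] at h1; omega
  have hg : PySem.List.pyGet? s.toList j = some (PySem.List.pyGetD s.toList j 'a') := by
    rw [hjn, PySem.List.pyGet?_natCast, PySem.List.pyGetD_natCast]
    rw [List.getElem?_eq_getElem hlt, List.getD_eq_getElem _ _ hlt]
  simp [pvStep, hg]

-- ===== VERDICT (by name: the statement is the Claim_ definition above) =====
theorem countWrongPlacedBalls_spec : Claim_equal_countWrongPlacedBalls := by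
  intro s _
  have he := pvSlice_even s.toList
  have ho := pvSlice_odd s.toList
  unfold Spec_countWrongPlacedBalls
  rw [pvA_eq_enumerate, pvStep_fold s.toList 0 0]
  unfold countWrongPlacedBalls_alt PySem.Str.slice?
  simp only [PySem.Chars.slice?_eq_listSlice?]
  rw [he, ho]
  simp only [Option.map_some, Option.getD_some, PySem.Str.count]
  rw [show PySem.Int.mod 0 2 = 0 from rfl]
  simp [pvCount_singleton]
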